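-- pv_equiv track=rewrite | github.com/jisanggeun/daily-PS | Programmers/Python/43238_programmers.py | solution
-- ===== SOURCE A (Python) =====
-- def solution(n, times):
--     answer = 0
--
--     # 최소 걸리는 시간 ~ 최대 걸리는 시간
--     low, high = 1, max(times) * n
--
--     while low <= high:
--         # 중간 시간
--         mid = (low + high) // 2
--
--         # check
--         total = sum(mid // t for t in times)
--         if total >= n:
--             answer = mid
--             high = mid - 1
--         else:
--             low = mid + 1
--
--     return answer
-- ===== SOURCE B (Python) =====
-- def solution(n, times):
--     # Event replay with a closed-form jump: using the exact fixed-point service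
--     # rate sum(C//t), jump to a time T0 that provably lies strictly below the
--     # n-th completion, then serve the few remaining completions in value-batches
--     # (all inspectors finishing at the same earliest time at once).
--     if n <= 0:
--         return 0
--     if any(t <= 0 for t in times):
--         raise ValueError("inspection times must be positive")
--     C = 1 << 64
--     rate = sum(C // t for t in times)
--     T0 = (n - 1) * C // (rate + len(times))      # sum(T0//t) <= n-1 is guaranteed
--     counts = [T0 // t for t in times]            # completions no later than T0
--     answer = T0
--     while sum(counts) < n:
--         answer = min((c + 1) * t for c, t in zip(counts, times))
--         counts = [c + 1 if (c + 1) * t == answer else c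
--                   for c, t in zip(counts, times)]
--     return answer
-- ===== Notes on version B (the rewrite author's own statement) =====
-- stated objective: alternative
-- what changed: Replaced the binary search on the answer (bisecting [1, max*n] with the predicate sum(mid//t) >= n) by an event replay with a closed-form jump: compute the exact fixed-point service rate sum(C//t), jump to T0 = (n-1)*C//(rate+k) which provably lies strictly below the n-th completion time, then serve the at most ~k remaining completions in value-batches (all inspectors finishing at the earliest pending time at once); the last batch value is the answer.
-- outside the precondition, e.g. on solution(1, [0, 1]): A raises ZeroDivisionError, B raises ValueError; on solution(1, [0]): A returns 0, B raises ValueError; on solution(1, [-1]): A returns 0, B raises ValueError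
import Mathlib
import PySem

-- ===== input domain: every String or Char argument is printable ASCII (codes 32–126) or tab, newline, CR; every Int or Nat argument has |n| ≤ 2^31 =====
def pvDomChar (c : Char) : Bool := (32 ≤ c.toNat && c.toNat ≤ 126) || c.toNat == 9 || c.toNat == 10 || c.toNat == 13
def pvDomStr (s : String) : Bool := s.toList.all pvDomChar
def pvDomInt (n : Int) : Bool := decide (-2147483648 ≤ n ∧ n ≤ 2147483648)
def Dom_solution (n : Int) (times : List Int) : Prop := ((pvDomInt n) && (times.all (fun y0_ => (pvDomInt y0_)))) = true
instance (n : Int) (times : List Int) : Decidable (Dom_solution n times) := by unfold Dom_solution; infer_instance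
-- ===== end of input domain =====

-- B replaces A's binary search on the answer by an event replay with a closed-form jump
-- (rate estimate, then serve the remaining completions in value-batches); equivalence is
-- proved on nonempty lists of positive times (plus trivial n ≤ 0 corners).

-- ===== PORT A =====
-- sum(mid // t for t in times)
def sumDiv (T : Int) (times : List Int) : Int :=
  times.foldl (fun acc t => acc + PySem.Int.floordiv T t) 0

-- the 'while low <= high' loop of A, state (low, high, answer)
def solutionLoop (n : Int) (times : List Int) (low high answer : Int) : Int :=
  if h : low ≤ high then
    let mid := PySem.Int.floordiv (low + high) 2
    let total := sumDiv mid times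
    if n ≤ total then
      solutionLoop n times low (mid - 1) mid
    else
      solutionLoop n times (mid + 1) high answer
  else answer
termination_by (high + 1 - low).toNat
decreasing_by
  · have := PySem.Int.floordiv_two_mid_bounds h; omega
  · have := PySem.Int.floordiv_two_mid_bounds h; omega

def solution (n : Int) (times : List Int) : Int :=
  solutionLoop n times 1 (((PySem.List.max? times (fun y => y)).getD 0) * n) 0

-- ===== PORT B =====
-- the 'while sum(counts) < n' loop of B, state (counts, answer); fuel is only a
-- totality guard: every batch serves at least one completion, so (n - sum(counts))
-- many steps always suffice
def jumpLoop (n : Int) (times : List Int) : Nat → List Int × Int → List Int × Int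
  | 0, st => st
  | fuel + 1, (counts, answer) =>
    if counts.sum < n then
      match PySem.List.min? ((counts.zip times).map (fun p => (p.1 + 1) * p.2))
          (fun y => y) with
      | none => (counts, answer)   -- times = []: Python's min raises ValueError (outside Pre_)
      | some v =>
        jumpLoop n times fuel
          ((counts.zip times).map (fun p => if (p.1 + 1) * p.2 = v then p.1 + 1 else p.1), v)
    else (counts, answer)

-- 'if any(t <= 0 for t in times): raise ValueError' guards B's entry: those inputs are
-- outside Pre_, so the port carries no value for them and just proceeds
def solution_alt (n : Int) (times : List Int) : Int :=
  if n ≤ 0 then 0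
  else
    let C : Int := 2 ^ 64
    let rate := times.foldl (fun acc t => acc + PySem.Int.floordiv C t) 0
    let T0 := PySem.Int.floordiv ((n - 1) * C) (rate + times.length)
    let counts := times.map (fun t => PySem.Int.floordiv T0 t)
    (jumpLoop n times (n - counts.sum).toNat (counts, T0)).2

-- ===== PRECONDITION & SPEC =====
-- Pre_ excludes empty times (A raises ValueError from max, B's min raises ValueError
-- once someone must be served) and, when people actually have to be served, nonpositive
-- processing times, on which A either raises ZeroDivisionError (a zero time once the
-- search evaluates mid // t) or returns accidental values from meaningless binary-search
-- bounds while B raises ValueError (negative or zero times are outside the task's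
-- natural domain); kept besides the natural domain: n <= 0 with a nonnegative time or
-- with more inspectors than -n (neither program serves anybody).
def Pre_solution (n : Int) (times : List Int) : Prop :=
  times ≠ [] ∧ ((∀ t ∈ times, 1 ≤ t) ∨
    (n ≤ 0 ∧ ((∃ t ∈ times, 0 ≤ t) ∨ -n < (times.length : Int))))
instance (n : Int) (times : List Int) : Decidable (Pre_solution n times) := by
  unfold Pre_solution; infer_instance

def pvWitness_solution : Int × List Int := (6, [7, 10])

def Spec_solution (n : Int) (times : List Int) (out : Int) : Prop := out = solution_alt n times
instance (n : Int) (times : List Int) (out : Int) : Decidable (Spec_solution n times out) := by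
  unfold Spec_solution; infer_instance

-- ===== CLAIM (what is proved, stated in full; the proofs are below) =====
def Claim_equal_solution : Prop := ∀ (n : Int) (times : List Int), Dom_solution n times → Pre_solution n times → Spec_solution n times (solution n times)

-- ===== LEMMAS AND PROOFS =====

theorem fd_mono {a b t : Int} (ht : 1 ≤ t) (h : a ≤ b) :
    PySem.Int.floordiv a t ≤ PySem.Int.floordiv b t := by
  rw [PySem.Int.floordiv_eq_ediv_of_pos (by omega), PySem.Int.floordiv_eq_ediv_of_pos (by omega)]
  exact Int.ediv_le_ediv (by omega) h

theorem sumDiv_eq_sum (T : Int) (times : List Int) :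
    sumDiv T times = (times.map (fun t => PySem.Int.floordiv T t)).sum := by
  simp [sumDiv, PySem.List.foldl_add]

theorem sumDiv_mono {times : List Int} (hts : ∀ t ∈ times, 1 ≤ t) {a b : Int} (h : a ≤ b) :
    sumDiv a times ≤ sumDiv b times := by
  rw [sumDiv_eq_sum, sumDiv_eq_sum]
  exact List.sum_le_sum (fun t ht => fd_mono (hts t ht) h)

theorem sumDiv_zero {times : List Int} (hts : ∀ t ∈ times, 1 ≤ t) :
    sumDiv 0 times = 0 := by
  rw [sumDiv_eq_sum]
  apply List.sum_eq_zero
  intro x hx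
  obtain ⟨t, ht, rfl⟩ := List.mem_map.mp hx
  rw [PySem.Int.floordiv_eq_ediv_of_pos (by have := hts t ht; omega)]
  exact Int.zero_ediv t

theorem sumDiv_nonpos {times : List Int} (hts : ∀ t ∈ times, 1 ≤ t) {T : Int} (h : T ≤ 0) :
    sumDiv T times ≤ 0 := by
  have := sumDiv_mono hts h (times := times)
  rw [sumDiv_zero hts] at this
  exact this

theorem le_sumDiv_of_mem {times : List Int} (hts : ∀ t ∈ times, 1 ≤ t) {t0 : Int}
    (hmem : t0 ∈ times) {T : Int} (hT : 0 ≤ T) :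
    PySem.Int.floordiv T t0 ≤ sumDiv T times := by
  rw [sumDiv_eq_sum]
  refine List.single_le_sum ?_ _ (List.mem_map_of_mem hmem)
  intro x hx
  obtain ⟨t, ht, rfl⟩ := List.mem_map.mp hx
  rw [PySem.Int.floordiv_eq_ediv_of_pos (by have := hts t ht; omega)]
  exact Int.ediv_nonneg hT (by have := hts t ht; omega)

-- the A-side loop returns the least time T ≥ 1 whose throughput reaches n
theorem Aloop_least {n : Int} {times : List Int} (hn : 1 ≤ n) (hts : ∀ t ∈ times, 1 ≤ t)
    (low high ans : Int) (h1 : 1 ≤ low)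
    (h2 : ∀ T, 1 ≤ T → T < low → sumDiv T times < n)
    (h3 : (ans = 0 ∧ n ≤ sumDiv high times) ∨ (ans = high + 1 ∧ n ≤ sumDiv ans times)) :
    1 ≤ solutionLoop n times low high ans ∧
    n ≤ sumDiv (solutionLoop n times low high ans) times ∧
    ∀ T, 1 ≤ T → T < solutionLoop n times low high ans → sumDiv T times < n := by
  have H : ∀ m : ℕ, ∀ low high ans : Int, (high + 1 - low).toNat = m → 1 ≤ low →
      (∀ T, 1 ≤ T → T < low → sumDiv T times < n) →
      ((ans = 0 ∧ n ≤ sumDiv high times) ∨ (ans = high + 1 ∧ n ≤ sumDiv ans times)) →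
      1 ≤ solutionLoop n times low high ans ∧
      n ≤ sumDiv (solutionLoop n times low high ans) times ∧
      ∀ T, 1 ≤ T → T < solutionLoop n times low high ans → sumDiv T times < n := by
    intro m
    induction m using Nat.strong_induction_on with
    | _ m IH =>
      intro low high ans hm h1 h2 h3
      rw [solutionLoop]
      by_cases hlh : low ≤ high
      · rw [dif_pos hlh]
        obtain ⟨hml, hmh⟩ := PySem.Int.floordiv_two_mid_bounds hlh
        set mid := PySem.Int.floordiv (low + high) 2 with hmid
        show 1 ≤ (if n ≤ sumDiv mid times then solutionLoop n times low (mid - 1) mid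
                  else solutionLoop n times (mid + 1) high ans) ∧ _
        by_cases hc : n ≤ sumDiv mid times
        · rw [if_pos hc]
          exact IH ((mid - 1) + 1 - low).toNat (by omega) low (mid - 1) mid rfl h1 h2
            (Or.inr ⟨by omega, hc⟩)
        · rw [if_neg hc]
          refine IH (high + 1 - (mid + 1)).toNat (by omega) (mid + 1) high ans rfl (by omega) ?_ h3
          intro T hT1 hT2
          exact lt_of_le_of_lt (sumDiv_mono hts (by omega)) (not_le.mp hc)
      · rw [dif_neg hlh]
        rcases h3 with ⟨ha0, hhigh⟩ | ⟨hae, hansf⟩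
        · exfalso
          by_cases hh1 : 1 ≤ high
          · exact absurd hhigh (not_le.mpr (h2 high hh1 (by omega)))
          · have := sumDiv_nonpos hts (T := high) (by omega); omega
        · have hans1 : 1 ≤ ans := by
            by_contra hle
            have := sumDiv_nonpos hts (T := ans) (by omega)
            omega
          have hansge : low ≤ ans := by
            by_contra hlt
            exact absurd hansf (not_le.mpr (h2 ans hans1 (by omega)))
          exact ⟨hans1, hansf, fun T hT1 hT2 => h2 T hT1 (by omega)⟩
  exact H _ low high ans rfl h1 h2 h3

theorem least_unique {n : Int} {times : List Int} (hts : ∀ t ∈ times, 1 ≤ t) {R1 R2 : Int}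
    (p1 : 1 ≤ R1 ∧ n ≤ sumDiv R1 times ∧ ∀ T, 1 ≤ T → T < R1 → sumDiv T times < n)
    (p2 : 1 ≤ R2 ∧ n ≤ sumDiv R2 times ∧ ∀ T, 1 ≤ T → T < R2 → sumDiv T times < n) :
    R1 = R2 := by
  rcases p1 with ⟨a1, b1, c1⟩
  rcases p2 with ⟨a2, b2, c2⟩
  by_contra hne
  rcases lt_or_gt_of_ne hne with h | h
  · exact absurd b1 (not_le.mpr (c2 _ a1 h))
  · exact absurd b2 (not_le.mpr (c1 _ a2 h))

-- A's loop returns its 'answer' unchanged when no probed time reaches throughput n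
theorem Aloop_noop {n : Int} {times : List Int} :
    ∀ (low high ans : Int), (∀ T, low ≤ T → T ≤ high → sumDiv T times < n) →
    solutionLoop n times low high ans = ans := by
  have H : ∀ m : ℕ, ∀ low high ans : Int, (high + 1 - low).toNat = m →
      (∀ T, low ≤ T → T ≤ high → sumDiv T times < n) →
      solutionLoop n times low high ans = ans := by
    intro m
    induction m using Nat.strong_induction_on with
    | _ m IH =>
      intro low high ans hm hall
      rw [solutionLoop]
      by_cases hlh : low ≤ high
      · rw [dif_pos hlh]
        obtain ⟨hml, hmh⟩ := PySem.Int.floordiv_two_mid_bounds hlh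
        set mid := PySem.Int.floordiv (low + high) 2 with hmid
        rw [if_neg (by exact not_le.mpr (hall mid hml hmh))]
        exact IH (high + 1 - (mid + 1)).toNat (by omega) (mid + 1) high ans rfl
          (fun T h1 h2 => hall T (by omega) h2)
      · rw [dif_neg hlh]
  exact fun low high ans => H _ low high ans rfl

-- with every time negative, every probed T ≥ 1 has throughput ≤ -len(times)
theorem sumDiv_all_neg {times : List Int} (hneg : ∀ t ∈ times, t < 0) {T : Int}
    (hT : 1 ≤ T) : sumDiv T times ≤ -(times.length : Int) := by
  rw [sumDiv_eq_sum]
  have hle : ∀ t ∈ times, PySem.Int.floordiv T t ≤ -1 := by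
    intro t ht
    have htn := hneg t ht
    obtain ⟨hm1, hm2⟩ := PySem.Int.mod_neg_bounds (a := T) htn
    have hid := PySem.Int.floordiv_mul_add_mod T t
    nlinarith [hid, hm1, hm2]
  calc (times.map (fun t => PySem.Int.floordiv T t)).sum
      ≤ (times.map (fun _ => (-1 : Int))).sum := List.sum_le_sum hle
    _ = -(times.length : Int) := by simp [List.map_const']

-- ===== B-side lemmas =====

theorem zip_map_self (g : Int → Int) : ∀ (l : List Int),
    (l.map g).zip l = l.map (fun t => (g t, t))
  | [] => rfl
  | x :: xs => by simp [zip_map_self g xs]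

-- the jump estimate: sum(T0//t) * C ≤ T0 * (sum(C//t) + len(times)) for T0 ≥ 0
theorem sumDiv_mul_le {C : Int} (hC : 1 ≤ C) {T0 : Int} (hT0 : 0 ≤ T0) :
    ∀ (times : List Int), (∀ t ∈ times, 1 ≤ t) →
    sumDiv T0 times * C ≤ T0 * (sumDiv C times + times.length) := by
  intro times
  induction times with
  | nil => intro _; simp [sumDiv]
  | cons t ts IH =>
    intro hts
    have ht : 1 ≤ t := hts t (by simp)
    have hts' : ∀ x ∈ ts, 1 ≤ x := fun x hx => hts x (by simp [hx])
    have hIH := IH hts'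
    have h1 : PySem.Int.floordiv T0 t * t ≤ T0 ∧ T0 < (PySem.Int.floordiv T0 t + 1) * t :=
      (PySem.Int.floordiv_eq_iff_of_pos (by omega)).mp rfl
    have h2 : PySem.Int.floordiv C t * t ≤ C ∧ C < (PySem.Int.floordiv C t + 1) * t :=
      (PySem.Int.floordiv_eq_iff_of_pos (by omega)).mp rfl
    have ha : 0 ≤ PySem.Int.floordiv T0 t := by
      rw [PySem.Int.floordiv_eq_ediv_of_pos (by omega)]
      exact Int.ediv_nonneg hT0 (by omega)
    have hcons1 : sumDiv T0 (t :: ts) = PySem.Int.floordiv T0 t + sumDiv T0 ts := by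
      rw [sumDiv_eq_sum, sumDiv_eq_sum]; simp
    have hcons2 : sumDiv C (t :: ts) = PySem.Int.floordiv C t + sumDiv C ts := by
      rw [sumDiv_eq_sum, sumDiv_eq_sum]; simp
    rw [hcons1, hcons2]
    have hhead : PySem.Int.floordiv T0 t * C ≤ T0 * (PySem.Int.floordiv C t + 1) := by
      nlinarith [h1.1, h2.2, ha, ht]
    have : (PySem.Int.floordiv T0 t + sumDiv T0 ts) * C
        = PySem.Int.floordiv T0 t * C + sumDiv T0 ts * C := by ring
    rw [this]
    have hlen : ((t :: ts).length : Int) = (ts.length : Int) + 1 := by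
      simp
    nlinarith [hhead, hIH]

-- between a frontier F and the least next completion v, each count v//t is F//t,
-- incremented exactly for the inspectors whose next completion is v
theorem floordiv_update {t F v : Int} (ht : 1 ≤ t) (hF : 0 ≤ F) (hFv : F < v)
    (hle : v ≤ (PySem.Int.floordiv F t + 1) * t) :
    PySem.Int.floordiv v t =
      if (PySem.Int.floordiv F t + 1) * t = v then PySem.Int.floordiv F t + 1
      else PySem.Int.floordiv F t := by
  have h1 : PySem.Int.floordiv F t * t ≤ F ∧ F < (PySem.Int.floordiv F t + 1) * t :=
    (PySem.Int.floordiv_eq_iff_of_pos (by omega)).mp rfl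
  by_cases hc : (PySem.Int.floordiv F t + 1) * t = v
  · rw [if_pos hc]
    rw [PySem.Int.floordiv_eq_iff_of_pos (by omega)]
    constructor
    · omega
    · nlinarith [h1.1]
  · rw [if_neg hc]
    rw [PySem.Int.floordiv_eq_iff_of_pos (by omega)]
    exact ⟨by omega, by omega⟩

-- B's loop, started at frontier F below the answer, lands exactly on the least
-- time T with throughput ≥ n
theorem jumpLoop_least {n : Int} {times : List Int} (hts : ∀ t ∈ times, 1 ≤ t)
    (hne : times ≠ []) :
    ∀ (fuel : Nat) (F : Int), 0 ≤ F →
    (∀ T, T ≤ F → sumDiv T times < n) →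
    (n - sumDiv F times).toNat ≤ fuel →
    n ≤ sumDiv (jumpLoop n times fuel
        (times.map (fun t => PySem.Int.floordiv F t), F)).2 times ∧
    ∀ T, T < (jumpLoop n times fuel
        (times.map (fun t => PySem.Int.floordiv F t), F)).2 → sumDiv T times < n := by
  intro fuel
  induction fuel with
  | zero =>
    intro F hF hlow hfuel
    exact absurd (hlow F le_rfl) (by omega)
  | succ fuel IH =>
    intro F hF hlow hfuel
    have hsum : (times.map (fun t => PySem.Int.floordiv F t)).sum = sumDiv F times :=
      (sumDiv_eq_sum F times).symm
    rw [jumpLoop]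
    rw [if_pos (by rw [hsum]; exact hlow F le_rfl)]
    rw [zip_map_self]
    rw [List.map_map]
    have hL : (times.map ((fun p : Int × Int => (p.1 + 1) * p.2) ∘
        fun t => (PySem.Int.floordiv F t, t)))
        = times.map (fun t => (PySem.Int.floordiv F t + 1) * t) := by
      simp [Function.comp]
    rw [hL]
    obtain ⟨v, hv⟩ : ∃ v, PySem.List.min?
        (times.map (fun t => (PySem.Int.floordiv F t + 1) * t)) (fun y => y) = some v := by
      cases hmx : PySem.List.min?
          (times.map (fun t => (PySem.Int.floordiv F t + 1) * t)) (fun y => y) with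
      | none =>
        exact absurd (List.map_eq_nil_iff.mp
          ((PySem.List.min?_eq_none_iff _ _).mp hmx)) hne
      | some v => exact ⟨v, rfl⟩
    rw [hv]
    show n ≤ sumDiv (jumpLoop n times fuel
        ((times.map (fun t => (PySem.Int.floordiv F t, t))).map
          (fun p : Int × Int => if (p.1 + 1) * p.2 = v then p.1 + 1 else p.1), v)).2 times ∧
      ∀ T, T < (jumpLoop n times fuel
        ((times.map (fun t => (PySem.Int.floordiv F t, t))).map
          (fun p : Int × Int => if (p.1 + 1) * p.2 = v then p.1 + 1 else p.1), v)).2 →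
        sumDiv T times < n
    obtain ⟨t0, ht0mem, ht0v⟩ := List.mem_map.mp (PySem.List.min?_mem hv)
    have hmin : ∀ t ∈ times, v ≤ (PySem.Int.floordiv F t + 1) * t := by
      intro t ht
      exact PySem.List.min?_isMin hv _ (List.mem_map_of_mem ht)
    have ht01 : 1 ≤ t0 := hts t0 ht0mem
    have hFt0 : PySem.Int.floordiv F t0 * t0 ≤ F ∧ F < (PySem.Int.floordiv F t0 + 1) * t0 :=
      (PySem.Int.floordiv_eq_iff_of_pos (by omega)).mp rfl
    have hFv : F < v := by rw [← ht0v]; exact hFt0.2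
    -- the batch update turns the counts into those of frontier v
    have hupd : (times.map (fun t => (PySem.Int.floordiv F t, t))).map
        (fun p : Int × Int => if (p.1 + 1) * p.2 = v then p.1 + 1 else p.1)
        = times.map (fun t => PySem.Int.floordiv v t) := by
      rw [List.map_map]
      apply List.map_congr_left
      intro t ht
      simp only [Function.comp]
      exact (floordiv_update (hts t ht) hF hFv (hmin t ht)).symm
    rw [hupd]
    -- throughput strictly increases at each batch
    have hstrict : sumDiv F times < sumDiv v times := by
      rw [sumDiv_eq_sum, sumDiv_eq_sum]
      apply List.sum_lt_sum
      · intro t ht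
        exact fd_mono (hts t ht) (by omega)
      · refine ⟨t0, ht0mem, ?_⟩
        have := floordiv_update ht01 hF hFv (hmin t0 ht0mem)
        rw [if_pos ht0v] at this
        omega
    -- every T < v keeps throughput below n
    have hlow' : ∀ T, T < v → sumDiv T times < n := by
      intro T hT
      by_cases hTF : T ≤ F
      · exact hlow T hTF
      · have hband : sumDiv T times ≤ sumDiv F times := by
          rw [sumDiv_eq_sum, sumDiv_eq_sum]
          apply List.sum_le_sum
          intro t ht
          have hnext := hmin t ht
          have h1 : 1 ≤ t := hts t ht
          have : T < (PySem.Int.floordiv F t + 1) * t := by omega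
          have hlt := (PySem.Int.floordiv_lt_iff_lt_mul
            (a := T) (b := t) (q := PySem.Int.floordiv F t + 1) (by omega)).mpr this
          omega
        exact lt_of_le_of_lt hband (hlow F le_rfl)
    by_cases hfv : sumDiv v times < n
    · exact IH v (by omega) (fun T hT => by
        rcases eq_or_lt_of_le hT with rfl | h
        · exact hfv
        · exact hlow' T h) (by omega)
    · -- the loop stops with answer v on the next check (or when fuel runs out)
      have hstop : (jumpLoop n times fuel
          (times.map (fun t => PySem.Int.floordiv v t), v)).2 = v := by
        cases fuel with
        | zero => rfl
        | succ f =>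
          rw [jumpLoop]
          rw [if_neg (by rw [← sumDiv_eq_sum]; omega)]
      rw [hstop]
      exact ⟨by omega, hlow'⟩

-- B's result is the least T ≥ 1 with sumDiv T times ≥ n
theorem alt_least {n : Int} {times : List Int} (hn : 1 ≤ n) (hts : ∀ t ∈ times, 1 ≤ t)
    (hne : times ≠ []) :
    1 ≤ solution_alt n times ∧
    n ≤ sumDiv (solution_alt n times) times ∧
    ∀ T, 1 ≤ T → T < solution_alt n times → sumDiv T times < n := by
  simp only [solution_alt, if_neg (show ¬ n ≤ 0 by omega)]
  rw [show (times.foldl (fun acc t => acc + PySem.Int.floordiv (2 ^ 64) t) 0)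
      = sumDiv (2 ^ 64) times from rfl]
  have hCpos : (1 : Int) ≤ 2 ^ 64 := by norm_num
  have hrate0 : 0 ≤ sumDiv (2 ^ 64) times := by
    rw [sumDiv_eq_sum]
    apply List.sum_nonneg
    intro x hx
    obtain ⟨t, ht, rfl⟩ := List.mem_map.mp hx
    rw [PySem.Int.floordiv_eq_ediv_of_pos (by have := hts t ht; omega)]
    exact Int.ediv_nonneg (by norm_num) (by have := hts t ht; omega)
  have hlen1 : 1 ≤ (times.length : Int) := by
    have : times.length ≠ 0 := fun h => hne (List.eq_nil_of_length_eq_zero h)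
    omega
  set D := sumDiv (2 ^ 64) times + (times.length : Int) with hD
  have hDpos : 0 < D := by omega
  set T0 := PySem.Int.floordiv ((n - 1) * (2 ^ 64)) D with hT0def
  have hT0nn : 0 ≤ T0 := by
    rw [hT0def, PySem.Int.floordiv_eq_ediv_of_pos hDpos]
    exact Int.ediv_nonneg (by nlinarith) (by omega)
  have hT0mul : T0 * D ≤ (n - 1) * 2 ^ 64 := by
    have := (PySem.Int.le_floordiv_iff_mul_le (a := (n - 1) * (2 ^ 64)) (b := D)
      (q := T0) hDpos).mp le_rfl
    exact this
  -- the jump lands strictly below the answer: sum(T0//t) ≤ n-1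
  have hjump : sumDiv T0 times ≤ n - 1 := by
    have h1 := sumDiv_mul_le hCpos hT0nn times hts
    have h2 : sumDiv T0 times * 2 ^ 64 ≤ (n - 1) * 2 ^ 64 := by
      calc sumDiv T0 times * 2 ^ 64 ≤ T0 * D := by rw [hD] at *; exact h1
        _ ≤ (n - 1) * 2 ^ 64 := hT0mul
    nlinarith [h2]
  have hlow : ∀ T, T ≤ T0 → sumDiv T times < n :=
    fun T hT => lt_of_le_of_lt (sumDiv_mono hts hT) (by omega)
  have hmain := jumpLoop_least hts hne
    ((n - (times.map (fun t => PySem.Int.floordiv T0 t)).sum).toNat) T0 hT0nn hlow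
    (by rw [← sumDiv_eq_sum])
  refine ⟨?_, hmain.1, fun T _ hT => hmain.2 T hT⟩
  by_contra hR
  have h0 := sumDiv_nonpos hts (T := (jumpLoop n times
    (n - (List.map (fun t => PySem.Int.floordiv T0 t) times).sum).toNat
    (List.map (fun t => PySem.Int.floordiv T0 t) times, T0)).2) (by omega)
  have := hmain.1
  omega

-- ===== VERDICT (by name: the statement is the Claim_ definition above) =====
theorem solution_spec : Claim_equal_solution := by
  intro n times _dom hpre
  obtain ⟨hne, hcase⟩ := hpre
  unfold Spec_solution
  obtain ⟨m, hm⟩ : ∃ m, PySem.List.max? times (fun y => y) = some m := by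
    cases hmx : PySem.List.max? times (fun y => y) with
    | none => exact absurd ((PySem.List.max?_eq_none_iff times (fun y => y)).mp hmx) hne
    | some m => exact ⟨m, rfl⟩
  have hmmem : m ∈ times := PySem.List.max?_mem hm
  rcases hcase with hts | ⟨hn0, hsub⟩
  · have hm1 : 1 ≤ m := hts m hmmem
    by_cases hn : n ≤ 0
    · -- A's loop never runs (high = m*n ≤ 0 < 1); B returns 0 up front
      have hA : solution n times = 0 := by
        unfold solution
        rw [hm]
        simp only [Option.getD_some]
        have hmn : m * n ≤ 0 := by
          have : m * n ≤ m * 0 := mul_le_mul_of_nonneg_left hn (by omega)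
          simpa using this
        rw [solutionLoop, dif_neg (by omega)]
      have hB : solution_alt n times = 0 := by
        unfold solution_alt
        rw [if_pos hn]
      rw [hA, hB]
    · push_neg at hn
      have hn1 : 1 ≤ n := hn
      have hH : n ≤ sumDiv (m * n) times := by
        have h1 : PySem.Int.floordiv (m * n) m = n := by
          rw [PySem.Int.floordiv_eq_ediv_of_pos (by omega)]
          exact Int.mul_ediv_cancel_left n (by omega)
        have h2 := le_sumDiv_of_mem hts hmmem (T := m * n)
          (mul_nonneg (by omega) (by omega))
        rw [h1] at h2
        exact h2
      have hA : 1 ≤ solution n times ∧ n ≤ sumDiv (solution n times) times ∧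
          ∀ T, 1 ≤ T → T < solution n times → sumDiv T times < n := by
        unfold solution
        rw [hm]
        simp only [Option.getD_some]
        exact Aloop_least hn1 hts 1 (m * n) 0 le_rfl
          (by intro T hT1 hT2; omega) (Or.inl ⟨rfl, hH⟩)
      exact least_unique hts hA (alt_least hn1 hts hne)
  · -- n ≤ 0: B returns 0 up front; A's loop either never runs (max ≥ 0) or
    -- never reaches throughput n (all times negative, more inspectors than -n)
    have hB : solution_alt n times = 0 := by
      unfold solution_alt
      rw [if_pos hn0]
    have hA : solution n times = 0 := by
      unfold solution
      rw [hm]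
      simp only [Option.getD_some]
      by_cases hm0 : 0 ≤ m
      · have hmn : m * n ≤ 0 := by
          have : m * n ≤ m * 0 := mul_le_mul_of_nonneg_left hn0 hm0
          simpa using this
        rw [solutionLoop, dif_neg (by omega)]
      · have hneg : ∀ t ∈ times, t < 0 := by
          intro t ht
          have := PySem.List.max?_isMax hm t ht
          omega
        have hk : -n < (times.length : Int) := by
          rcases hsub with ⟨t0, ht0mem, ht00⟩ | hk
          · exact absurd (hneg t0 ht0mem) (by omega)
          · exact hk
        apply Aloop_noop
        intro T h1 h2
        calc sumDiv T times ≤ -(times.length : Int) := sumDiv_all_neg hneg h1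
          _ < n := by omega
    rw [hA, hB]
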